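-- pv_equiv track=rewrite | github.com/Seth0110/omurice | ATR2FUNC.py | hex2int
-- ===== SOURCE A (Python) =====
-- def hex2int(s): # s:string
--     i = 0
--     w = 0
--     while i < len(s):
--         if s[i] == '0':
--             w = (w << 4) | 0x0
--         elif s[i] == '1':
--             w = (w << 4) | 0x1
--         elif s[i] == '2':
--             w = (w << 4) | 0x2
--         elif s[i] == '3':
--             w = (w << 4) | 0x3
--         elif s[i] == '4':
--             w = (w << 4) | 0x4
--         elif s[i] == '5':
--             w = (w << 4) | 0x5
--         elif s[i] == '6':
--             w = (w << 4) | 0x6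
--         elif s[i] == '7':
--             w = (w << 4) | 0x7
--         elif s[i] == '8':
--             w = (w << 4) | 0x8
--         elif s[i] == '9':
--             w = (w << 4) | 0x9
--         elif s[i] == 'A':
--             w = (w << 4) | 0xA
--         elif s[i] == 'B':
--             w = (w << 4) | 0xB
--         elif s[i] == 'C':
--             w = (w << 4) | 0xC
--         elif s[i] == 'D':
--             w = (w << 4) | 0xD
--         elif s[i] == 'E':
--             w = (w << 4) | 0xE
--         elif s[i] == 'F':
--             w = (w << 4) | 0xF
--         else:
--             i = len(s)
--         i = i + 1
--     return w
-- ===== SOURCE B (Python) =====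
-- def hex2int(s): # s:string
--     buf = []
--     for c in s:
--         if c in '0123456789ABCDEF':
--             buf.append(c)
--         else:
--             break
--     if not buf:
--         return 0
--     return int(''.join(buf), 16)
-- ===== Notes on version B (the rewrite author's own statement) =====
-- stated objective: simpler
-- what changed: A accumulates the result per character with a 16-branch if/elif chain of shift-or updates; B just scans off the leading run of valid hex characters and converts it once with int(buf, 16), returning 0 for an empty run.
import Mathlib
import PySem

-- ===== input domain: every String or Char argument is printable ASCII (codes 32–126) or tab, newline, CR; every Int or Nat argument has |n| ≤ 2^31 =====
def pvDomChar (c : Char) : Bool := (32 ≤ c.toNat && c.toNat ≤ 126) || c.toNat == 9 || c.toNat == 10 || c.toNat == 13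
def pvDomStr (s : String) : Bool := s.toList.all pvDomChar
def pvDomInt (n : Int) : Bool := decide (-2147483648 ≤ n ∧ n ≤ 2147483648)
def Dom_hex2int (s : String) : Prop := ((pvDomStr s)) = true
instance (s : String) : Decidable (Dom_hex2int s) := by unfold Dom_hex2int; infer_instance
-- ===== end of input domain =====

-- B replaces A's 16-way shift-or accumulation loop with a hex-prefix scan plus one base-16 conversion (objective: simpler).

-- ===== PORT A =====
-- A's while loop over indices, with the 16-branch if/elif chain; the final else sets i = len(s) (break), returning w.
def hex2intLoop : List Char → Int → Int
  | [], w => w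
  | c :: rest, w =>
    if c = '0' then hex2intLoop rest (PySem.Int.bor (w <<< (4:Nat)) 0)
    else if c = '1' then hex2intLoop rest (PySem.Int.bor (w <<< (4:Nat)) 1)
    else if c = '2' then hex2intLoop rest (PySem.Int.bor (w <<< (4:Nat)) 2)
    else if c = '3' then hex2intLoop rest (PySem.Int.bor (w <<< (4:Nat)) 3)
    else if c = '4' then hex2intLoop rest (PySem.Int.bor (w <<< (4:Nat)) 4)
    else if c = '5' then hex2intLoop rest (PySem.Int.bor (w <<< (4:Nat)) 5)
    else if c = '6' then hex2intLoop rest (PySem.Int.bor (w <<< (4:Nat)) 6)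
    else if c = '7' then hex2intLoop rest (PySem.Int.bor (w <<< (4:Nat)) 7)
    else if c = '8' then hex2intLoop rest (PySem.Int.bor (w <<< (4:Nat)) 8)
    else if c = '9' then hex2intLoop rest (PySem.Int.bor (w <<< (4:Nat)) 9)
    else if c = 'A' then hex2intLoop rest (PySem.Int.bor (w <<< (4:Nat)) 10)
    else if c = 'B' then hex2intLoop rest (PySem.Int.bor (w <<< (4:Nat)) 11)
    else if c = 'C' then hex2intLoop rest (PySem.Int.bor (w <<< (4:Nat)) 12)
    else if c = 'D' then hex2intLoop rest (PySem.Int.bor (w <<< (4:Nat)) 13)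
    else if c = 'E' then hex2intLoop rest (PySem.Int.bor (w <<< (4:Nat)) 14)
    else if c = 'F' then hex2intLoop rest (PySem.Int.bor (w <<< (4:Nat)) 15)
    else w

def hex2int (s : String) : Int := hex2intLoop s.toList 0

-- ===== PORT B =====
def hexDigits : List Char := ['0','1','2','3','4','5','6','7','8','9','A','B','C','D','E','F']

-- value of one uppercase hex digit, as int(·, 16) assigns it
def hexVal (c : Char) : Int := if c.toNat ≤ 57 then (c.toNat : Int) - 48 else (c.toNat : Int) - 55

def hex2int_alt (s : String) : Int :=
  let buf := s.toList.takeWhile (fun c => hexDigits.contains c)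
  if buf.isEmpty then 0
  else buf.foldl (fun a c => 16 * a + hexVal c) 0

-- ===== PRECONDITION & SPEC =====
def Spec_hex2int (s : String) (out : Int) : Prop := out = hex2int_alt s
instance (s : String) (out : Int) : Decidable (Spec_hex2int s out) := by unfold Spec_hex2int; infer_instance

-- ===== CLAIM (what is proved, stated in full; the proofs are below) =====
def Claim_equal_hex2int : Prop := ∀ (s : String), Dom_hex2int s → Spec_hex2int s (hex2int s)

-- ===== LEMMAS AND PROOFS =====

-- m < 2^k has its low k bits free: shifted-or is multiply-add
theorem shiftOr (k : Nat) : ∀ n m : Nat, m < 2 ^ k → (n <<< k) ||| m = 2 ^ k * n + m := by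
  induction k with
  | zero => intro n m h; interval_cases m; simp
  | succ k ih =>
    intro n m h
    have hm2 : m / 2 < 2 ^ k := by omega
    have ihm := ih n (m / 2) hm2
    have h1 : n <<< (k+1) = Nat.bit false (n <<< k) := by
      simp [Nat.bit, Nat.shiftLeft_succ, Nat.mul_comm]
    have h2 : m = Nat.bit (m.testBit 0) (m >>> 1) := (Nat.bit_testBit_zero_shiftRight_one m).symm
    have h3 : (n <<< (k+1)) ||| m = Nat.bit (false || m.testBit 0) ((n <<< k) ||| (m >>> 1)) := by
      rw [h1]; conv_lhs => rw [h2]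
      exact Nat.lor_bit false (n <<< k) (m.testBit 0) (m >>> 1)
    rw [h3]
    have h4 : m >>> 1 = m / 2 := Nat.shiftRight_one m
    rw [h4, ihm]
    rcases Nat.mod_two_eq_zero_or_one m with he | ho
    · have : m.testBit 0 = false := by simp [Nat.testBit_zero, he]
      simp [this, Nat.bit]; ring_nf; omega
    · have : m.testBit 0 = true := by simp [Nat.testBit_zero, ho]
      simp [this, Nat.bit]; ring_nf; omega

-- Python's (w << 4) | d, w ≥ 0, 0 ≤ d < 16, is 16*w + d
theorem step_eq (w : Int) (hw : 0 ≤ w) (d : Int) (hd0 : 0 ≤ d) (hd : d < 16) :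
    PySem.Int.bor (w <<< (4:Nat)) d = 16 * w + d := by
  obtain ⟨n, rfl⟩ := Int.eq_ofNat_of_zero_le hw
  obtain ⟨d, rfl⟩ := Int.eq_ofNat_of_zero_le hd0
  have hs : ((n : Int) <<< (4:Nat)) = ((n <<< 4 : Nat) : Int) := by
    simp [Int.shiftLeft_eq, Nat.shiftLeft_eq]
  rw [hs]
  unfold PySem.Int.bor
  simp only [Int.toNat_natCast, if_pos (Int.natCast_nonneg _)]
  rw [shiftOr 4 n d (by exact_mod_cast hd)]
  push_cast; ring

-- B's per-digit step starting from nonneg a stays nonneg and equals A's step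
theorem loop_eq_fold (l : List Char) : ∀ w : Int, 0 ≤ w →
    hex2intLoop l w = (l.takeWhile (fun c => hexDigits.contains c)).foldl (fun a c => 16 * a + hexVal c) w := by
  induction l with
  | nil => intro w _; simp [hex2intLoop]
  | cons c rest ih =>
    intro w hw
    by_cases h0 : c = '0'
    · subst h0
      have e1 : hex2intLoop ('0' :: rest) w = hex2intLoop rest (PySem.Int.bor (w <<< (4:Nat)) 0) := by
        simp [hex2intLoop]
      rw [e1, step_eq w hw 0 (by omega) (by omega)]
      have e2 : (('0' :: rest).takeWhile (fun c => hexDigits.contains c))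
          = '0' :: rest.takeWhile (fun c => hexDigits.contains c) := by
        simp [hexDigits]
      rw [e2, List.foldl_cons]
      have e3 : hexVal '0' = 0 := by decide
      rw [e3]
      exact ih (16 * w + 0) (by omega)
    by_cases h1 : c = '1'
    · subst h1
      have e1 : hex2intLoop ('1' :: rest) w = hex2intLoop rest (PySem.Int.bor (w <<< (4:Nat)) 1) := by
        simp [hex2intLoop]
      rw [e1, step_eq w hw 1 (by omega) (by omega)]
      have e2 : (('1' :: rest).takeWhile (fun c => hexDigits.contains c))
          = '1' :: rest.takeWhile (fun c => hexDigits.contains c) := by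
        simp [hexDigits]
      rw [e2, List.foldl_cons]
      have e3 : hexVal '1' = 1 := by decide
      rw [e3]
      exact ih (16 * w + 1) (by omega)
    by_cases h2 : c = '2'
    · subst h2
      have e1 : hex2intLoop ('2' :: rest) w = hex2intLoop rest (PySem.Int.bor (w <<< (4:Nat)) 2) := by
        simp [hex2intLoop]
      rw [e1, step_eq w hw 2 (by omega) (by omega)]
      have e2 : (('2' :: rest).takeWhile (fun c => hexDigits.contains c))
          = '2' :: rest.takeWhile (fun c => hexDigits.contains c) := by
        simp [hexDigits]
      rw [e2, List.foldl_cons]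
      have e3 : hexVal '2' = 2 := by decide
      rw [e3]
      exact ih (16 * w + 2) (by omega)
    by_cases h3 : c = '3'
    · subst h3
      have e1 : hex2intLoop ('3' :: rest) w = hex2intLoop rest (PySem.Int.bor (w <<< (4:Nat)) 3) := by
        simp [hex2intLoop]
      rw [e1, step_eq w hw 3 (by omega) (by omega)]
      have e2 : (('3' :: rest).takeWhile (fun c => hexDigits.contains c))
          = '3' :: rest.takeWhile (fun c => hexDigits.contains c) := by
        simp [hexDigits]
      rw [e2, List.foldl_cons]
      have e3 : hexVal '3' = 3 := by decide
      rw [e3]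
      exact ih (16 * w + 3) (by omega)
    by_cases h4 : c = '4'
    · subst h4
      have e1 : hex2intLoop ('4' :: rest) w = hex2intLoop rest (PySem.Int.bor (w <<< (4:Nat)) 4) := by
        simp [hex2intLoop]
      rw [e1, step_eq w hw 4 (by omega) (by omega)]
      have e2 : (('4' :: rest).takeWhile (fun c => hexDigits.contains c))
          = '4' :: rest.takeWhile (fun c => hexDigits.contains c) := by
        simp [hexDigits]
      rw [e2, List.foldl_cons]
      have e3 : hexVal '4' = 4 := by decide
      rw [e3]
      exact ih (16 * w + 4) (by omega)
    by_cases h5 : c = '5'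
    · subst h5
      have e1 : hex2intLoop ('5' :: rest) w = hex2intLoop rest (PySem.Int.bor (w <<< (4:Nat)) 5) := by
        simp [hex2intLoop]
      rw [e1, step_eq w hw 5 (by omega) (by omega)]
      have e2 : (('5' :: rest).takeWhile (fun c => hexDigits.contains c))
          = '5' :: rest.takeWhile (fun c => hexDigits.contains c) := by
        simp [hexDigits]
      rw [e2, List.foldl_cons]
      have e3 : hexVal '5' = 5 := by decide
      rw [e3]
      exact ih (16 * w + 5) (by omega)
    by_cases h6 : c = '6'
    · subst h6
      have e1 : hex2intLoop ('6' :: rest) w = hex2intLoop rest (PySem.Int.bor (w <<< (4:Nat)) 6) := by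
        simp [hex2intLoop]
      rw [e1, step_eq w hw 6 (by omega) (by omega)]
      have e2 : (('6' :: rest).takeWhile (fun c => hexDigits.contains c))
          = '6' :: rest.takeWhile (fun c => hexDigits.contains c) := by
        simp [hexDigits]
      rw [e2, List.foldl_cons]
      have e3 : hexVal '6' = 6 := by decide
      rw [e3]
      exact ih (16 * w + 6) (by omega)
    by_cases h7 : c = '7'
    · subst h7
      have e1 : hex2intLoop ('7' :: rest) w = hex2intLoop rest (PySem.Int.bor (w <<< (4:Nat)) 7) := by
        simp [hex2intLoop]
      rw [e1, step_eq w hw 7 (by omega) (by omega)]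
      have e2 : (('7' :: rest).takeWhile (fun c => hexDigits.contains c))
          = '7' :: rest.takeWhile (fun c => hexDigits.contains c) := by
        simp [hexDigits]
      rw [e2, List.foldl_cons]
      have e3 : hexVal '7' = 7 := by decide
      rw [e3]
      exact ih (16 * w + 7) (by omega)
    by_cases h8 : c = '8'
    · subst h8
      have e1 : hex2intLoop ('8' :: rest) w = hex2intLoop rest (PySem.Int.bor (w <<< (4:Nat)) 8) := by
        simp [hex2intLoop]
      rw [e1, step_eq w hw 8 (by omega) (by omega)]
      have e2 : (('8' :: rest).takeWhile (fun c => hexDigits.contains c))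
          = '8' :: rest.takeWhile (fun c => hexDigits.contains c) := by
        simp [hexDigits]
      rw [e2, List.foldl_cons]
      have e3 : hexVal '8' = 8 := by decide
      rw [e3]
      exact ih (16 * w + 8) (by omega)
    by_cases h9 : c = '9'
    · subst h9
      have e1 : hex2intLoop ('9' :: rest) w = hex2intLoop rest (PySem.Int.bor (w <<< (4:Nat)) 9) := by
        simp [hex2intLoop]
      rw [e1, step_eq w hw 9 (by omega) (by omega)]
      have e2 : (('9' :: rest).takeWhile (fun c => hexDigits.contains c))
          = '9' :: rest.takeWhile (fun c => hexDigits.contains c) := by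
        simp [hexDigits]
      rw [e2, List.foldl_cons]
      have e3 : hexVal '9' = 9 := by decide
      rw [e3]
      exact ih (16 * w + 9) (by omega)
    by_cases h10 : c = 'A'
    · subst h10
      have e1 : hex2intLoop ('A' :: rest) w = hex2intLoop rest (PySem.Int.bor (w <<< (4:Nat)) 10) := by
        simp [hex2intLoop]
      rw [e1, step_eq w hw 10 (by omega) (by omega)]
      have e2 : (('A' :: rest).takeWhile (fun c => hexDigits.contains c))
          = 'A' :: rest.takeWhile (fun c => hexDigits.contains c) := by
        simp [hexDigits]
      rw [e2, List.foldl_cons]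
      have e3 : hexVal 'A' = 10 := by decide
      rw [e3]
      exact ih (16 * w + 10) (by omega)
    by_cases h11 : c = 'B'
    · subst h11
      have e1 : hex2intLoop ('B' :: rest) w = hex2intLoop rest (PySem.Int.bor (w <<< (4:Nat)) 11) := by
        simp [hex2intLoop]
      rw [e1, step_eq w hw 11 (by omega) (by omega)]
      have e2 : (('B' :: rest).takeWhile (fun c => hexDigits.contains c))
          = 'B' :: rest.takeWhile (fun c => hexDigits.contains c) := by
        simp [hexDigits]
      rw [e2, List.foldl_cons]
      have e3 : hexVal 'B' = 11 := by decide
      rw [e3]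
      exact ih (16 * w + 11) (by omega)
    by_cases h12 : c = 'C'
    · subst h12
      have e1 : hex2intLoop ('C' :: rest) w = hex2intLoop rest (PySem.Int.bor (w <<< (4:Nat)) 12) := by
        simp [hex2intLoop]
      rw [e1, step_eq w hw 12 (by omega) (by omega)]
      have e2 : (('C' :: rest).takeWhile (fun c => hexDigits.contains c))
          = 'C' :: rest.takeWhile (fun c => hexDigits.contains c) := by
        simp [hexDigits]
      rw [e2, List.foldl_cons]
      have e3 : hexVal 'C' = 12 := by decide
      rw [e3]
      exact ih (16 * w + 12) (by omega)
    by_cases h13 : c = 'D'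
    · subst h13
      have e1 : hex2intLoop ('D' :: rest) w = hex2intLoop rest (PySem.Int.bor (w <<< (4:Nat)) 13) := by
        simp [hex2intLoop]
      rw [e1, step_eq w hw 13 (by omega) (by omega)]
      have e2 : (('D' :: rest).takeWhile (fun c => hexDigits.contains c))
          = 'D' :: rest.takeWhile (fun c => hexDigits.contains c) := by
        simp [hexDigits]
      rw [e2, List.foldl_cons]
      have e3 : hexVal 'D' = 13 := by decide
      rw [e3]
      exact ih (16 * w + 13) (by omega)
    by_cases h14 : c = 'E'
    · subst h14
      have e1 : hex2intLoop ('E' :: rest) w = hex2intLoop rest (PySem.Int.bor (w <<< (4:Nat)) 14) := by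
        simp [hex2intLoop]
      rw [e1, step_eq w hw 14 (by omega) (by omega)]
      have e2 : (('E' :: rest).takeWhile (fun c => hexDigits.contains c))
          = 'E' :: rest.takeWhile (fun c => hexDigits.contains c) := by
        simp [hexDigits]
      rw [e2, List.foldl_cons]
      have e3 : hexVal 'E' = 14 := by decide
      rw [e3]
      exact ih (16 * w + 14) (by omega)
    by_cases h15 : c = 'F'
    · subst h15
      have e1 : hex2intLoop ('F' :: rest) w = hex2intLoop rest (PySem.Int.bor (w <<< (4:Nat)) 15) := by
        simp [hex2intLoop]
      rw [e1, step_eq w hw 15 (by omega) (by omega)]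
      have e2 : (('F' :: rest).takeWhile (fun c => hexDigits.contains c))
          = 'F' :: rest.takeWhile (fun c => hexDigits.contains c) := by
        simp [hexDigits]
      rw [e2, List.foldl_cons]
      have e3 : hexVal 'F' = 15 := by decide
      rw [e3]
      exact ih (16 * w + 15) (by omega)
    have hmem : c ∉ hexDigits := by
      simp only [hexDigits]
      intro hm; fin_cases hm <;> simp_all
    simp [hex2intLoop, h0, h1, h2, h3, h4, h5, h6, h7, h8, h9, h10, h11, h12, h13, h14, h15, hmem]

-- ===== VERDICT (by name: the statement is the Claim_ definition above) =====
theorem hex2int_spec : Claim_equal_hex2int := by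
  unfold Claim_equal_hex2int
  intro s _
  unfold Spec_hex2int hex2int hex2int_alt
  rw [loop_eq_fold s.toList 0 le_rfl]
  by_cases hb : (s.toList.takeWhile (fun c => hexDigits.contains c)) = []
  · rw [hb]; simp
  · rw [if_neg (by simpa [List.isEmpty_iff] using hb)]
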